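-- pv_equiv track=rewrite | github.com/kakio426/eduitit | timetable/services.py | _is_split_pattern_satisfied
-- ===== SOURCE A (Python) =====
-- from collections import defaultdict
--
-- def _is_split_pattern_satisfied(placements, pattern, slot_index):
--     if not placements:
--         return False
--     by_day = defaultdict(list)
--     for day, slot in placements:
--         by_day[day].append(slot_index[slot])
--     for day in by_day:
--         by_day[day].sort()
--
--     required_runs = sorted([size for size in pattern if size > 1], reverse=True)
--     for size in required_runs:
--         found = False
--         for day, indexes in by_day.items():
--             for pos in range(0, len(indexes) - size + 1):
--                 window = indexes[pos : pos + size]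
--                 if _is_consecutive(window):
--                     found = True
--                     by_day[day] = indexes[:pos] + indexes[pos + size :]
--                     break
--             if found:
--                 break
--         if not found:
--             return False
--     return True
--
-- def _is_consecutive(values):
--     if not values:
--         return False
--     return all(values[idx + 1] - values[idx] == 1 for idx in range(len(values) - 1))
-- ===== SOURCE B (Python) =====
-- def _is_split_pattern_satisfied(placements, pattern, slot_index):
--     if not placements:
--         return False
--     by_day = {}
--     for day, slot in placements:
--         by_day.setdefault(day, []).append(slot_index[slot])
--     runs_by_day = {day: _runs(sorted(ids)) for day, ids in by_day.items()}
--     for size in sorted((s for s in pattern if s > 1), reverse=True):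
--         placed = None
--         for day, runs in runs_by_day.items():
--             placed = _place(runs, size)
--             if placed is not None:
--                 runs_by_day[day] = placed
--                 break
--         if placed is None:
--             return False
--     return True
--
--
-- def _runs(sorted_ids):
--     # collapse a sorted index list into maximal consecutive runs (start, length)
--     runs = []
--     i = 0
--     while i < len(sorted_ids):
--         j = i
--         while j + 1 < len(sorted_ids) and sorted_ids[j + 1] == sorted_ids[j] + 1:
--             j += 1
--         runs.append((sorted_ids[i], j - i + 1))
--         i = j + 1
--     return runs
--
--
-- def _place(runs, size):
--     # consume `size` slots from the front of the first run long enough; None if none is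
--     for i, (st, ln) in enumerate(runs):
--         if ln >= size:
--             if ln > size:
--                 return runs[:i] + [(st + size, ln - size)] + runs[i + 1:]
--             if i > 0 and i + 1 < len(runs) and runs[i + 1][0] == runs[i - 1][0] + runs[i - 1][1]:
--                 p, pl = runs[i - 1]
--                 q, ql = runs[i + 1]
--                 return runs[:i - 1] + [(p, pl + ql)] + runs[i + 2:]
--             return runs[:i] + runs[i + 1:]
--     return None
-- ===== Notes on version B (the rewrite author's own statement) =====
-- stated objective: faster
-- what changed: B replaces A's per-size re-scan of every window of each day's sorted index list (slicing and re-checking consecutiveness for each position) by a per-day run-length structure: each day's sorted indices are collapsed once into maximal consecutive runs (start, length), and each required size consumes the first long-enough run from the front, re-merging neighbouring runs when a run is deleted.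
-- outside the precondition, e.g. on _is_split_pattern_satisfied([('Mon', 'x')], [2], {'a': 0}): A raises KeyError, B raises KeyError
import Mathlib
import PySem

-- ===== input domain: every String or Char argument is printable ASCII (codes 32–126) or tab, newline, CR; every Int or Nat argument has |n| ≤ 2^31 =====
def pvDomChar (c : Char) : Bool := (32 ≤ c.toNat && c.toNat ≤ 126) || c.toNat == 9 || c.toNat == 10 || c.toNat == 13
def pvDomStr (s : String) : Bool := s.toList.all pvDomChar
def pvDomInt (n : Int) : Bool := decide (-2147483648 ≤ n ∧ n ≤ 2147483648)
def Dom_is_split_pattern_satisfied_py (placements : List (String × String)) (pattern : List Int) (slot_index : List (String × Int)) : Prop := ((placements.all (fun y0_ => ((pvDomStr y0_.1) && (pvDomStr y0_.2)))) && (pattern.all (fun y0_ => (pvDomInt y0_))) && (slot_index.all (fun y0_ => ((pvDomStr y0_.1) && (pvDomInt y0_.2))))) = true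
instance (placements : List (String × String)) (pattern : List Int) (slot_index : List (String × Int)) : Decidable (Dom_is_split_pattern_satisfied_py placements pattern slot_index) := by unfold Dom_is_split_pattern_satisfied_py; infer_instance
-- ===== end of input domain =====

-- B replaces A's per-size window re-scanning over each day's sorted index list by a run-length
-- data structure (maximal consecutive runs per day, shrunk from the front); equivalence of the
-- RETURN value is proved on inputs where every placed slot is a key of slot_index (Python A
-- raises KeyError otherwise).

-- ===== PORT A =====
-- helpers shared by both ports (both Pythons group placements by day with the same per-pair append)
-- slot_index[slot]; total via a default value only under Pre_ (a missing slot is a KeyError, excluded)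
def pvLookupIdx (slot_index : List (String × Int)) (slot : String) : Int :=
  (PySem.Dict.mk slot_index).getD slot 0

-- by_day[day].append(x) on a defaultdict(list): existing key keeps its position, new keys append
def pvGroupAdd : List (String × List Int) → String → Int → List (String × List Int)
  | [], d, x => [(d, [x])]
  | (k, v) :: rest, d, x =>
    if k == d then (k, v ++ [x]) :: rest else (k, v) :: pvGroupAdd rest d x

def pvGroup (placements : List (String × String)) (slot_index : List (String × Int)) : List (String × List Int) :=
  placements.foldl (fun bd p => pvGroupAdd bd p.1 (pvLookupIdx slot_index p.2)) []

-- _is_consecutive (indices of the all-loop are in range, so the pyGetD default is never read)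
def pvConsecA (values : List Int) : Bool :=
  if values.isEmpty then false
  else (PySem.List.pyRange 0 (PySem.List.len values - 1) 1).all
    (fun idx => PySem.List.pyGetD values (idx + 1) 0 - PySem.List.pyGetD values idx 0 == 1)

-- the inner 'for pos in range(...)' with its break: first pos whose window is consecutive
def pvTryDayA (idxs : List Int) (size : Int) : Option Int :=
  (PySem.List.pyRange 0 (PySem.List.len idxs - size + 1) 1).find?
    (fun pos => pvConsecA (PySem.List.slice idxs (some pos) (some (pos + size))))

-- indexes[:pos] + indexes[pos + size:]
def pvRemoveAt (idxs : List Int) (pos size : Int) : List Int :=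
  PySem.List.slice idxs none (some pos) ++ PySem.List.slice idxs (some (pos + size)) none

-- the 'for day, indexes in by_day.items()' with its break; the matched day's value is replaced in place
def pvSearchA : List (String × List Int) → Int → Option (List (String × List Int))
  | [], _ => none
  | (d, idxs) :: rest, size =>
    match pvTryDayA idxs size with
    | some pos => some ((d, pvRemoveAt idxs pos size) :: rest)
    | none =>
      match pvSearchA rest size with
      | none => none
      | some rest' => some ((d, idxs) :: rest')

def pvLoopA : List Int → List (String × List Int) → Bool
  | [], _ => true
  | size :: sizes, byDay =>
    match pvSearchA byDay size with
    | none => false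
    | some byDay' => pvLoopA sizes byDay'

def is_split_pattern_satisfied_py (placements : List (String × String)) (pattern : List Int) (slot_index : List (String × Int)) : Bool :=
  if placements.isEmpty then false
  else
    pvLoopA
      (PySem.List.sorted (pattern.filter (fun size => decide (1 < size))) (fun x => x) true)
      ((pvGroup placements slot_index).map (fun e => (e.1, PySem.List.sorted e.2 (fun x => x) false)))

-- ===== PORT B =====
-- _runs: collapse a sorted list into maximal consecutive runs (start, length);
-- the inner j-scan is pvRunLen, each outer-loop step emits one run and jumps past it
def pvRunLen : Int → List Int → Nat
  | _, [] => 0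
  | p, x :: xs => if x = p + 1 then 1 + pvRunLen x xs else 0

lemma pvRunLen_le (p : Int) (xs : List Int) : pvRunLen p xs ≤ xs.length := by
  induction xs generalizing p with
  | nil => simp [pvRunLen]
  | cons x xs ih =>
    simp only [pvRunLen]
    split
    · have := ih x; simp; omega
    · simp

def pvRuns : List Int → List (Int × Int)
  | [] => []
  | v :: rest => (v, (pvRunLen v rest : Int) + 1) :: pvRuns (rest.drop (pvRunLen v rest))
termination_by l => l.length
decreasing_by
  simp only [List.length_drop, List.length_cons]; have := pvRunLen_le v rest; omega

-- _place: acc is the reversed prefix runs[:i] (so runs[i-1] is acc's head), rest is runs[i:]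
def pvPlaceGo (size : Int) : List (Int × Int) → List (Int × Int) → Option (List (Int × Int))
  | acc, [] => (fun _ => none) acc
  | acc, (st, ln) :: rest =>
    if size ≤ ln then
      if size < ln then some (acc.reverse ++ (st + size, ln - size) :: rest)
      else
        match acc, rest with
        | (p, pl) :: acc', (q, ql) :: t =>
          if q = p + pl then some (acc'.reverse ++ (p, pl + ql) :: t)
          else some (((p, pl) :: acc').reverse ++ rest)
        | acc, rest => some (acc.reverse ++ rest)
    else pvPlaceGo size ((st, ln) :: acc) rest

def pvPlaceB (runs : List (Int × Int)) (size : Int) : Option (List (Int × Int)) :=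
  pvPlaceGo size [] runs

def pvSearchB : List (String × List (Int × Int)) → Int → Option (List (String × List (Int × Int)))
  | [], _ => none
  | (d, runs) :: rest, size =>
    match pvPlaceB runs size with
    | some runs' => some ((d, runs') :: rest)
    | none =>
      match pvSearchB rest size with
      | none => none
      | some rest' => some ((d, runs) :: rest')

def pvLoopB : List Int → List (String × List (Int × Int)) → Bool
  | [], _ => true
  | size :: sizes, byDay =>
    match pvSearchB byDay size with
    | none => false
    | some byDay' => pvLoopB sizes byDay'

def is_split_pattern_satisfied_py_alt (placements : List (String × String)) (pattern : List Int) (slot_index : List (String × Int)) : Bool :=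
  if placements.isEmpty then false
  else
    pvLoopB
      (PySem.List.sorted (pattern.filter (fun size => decide (1 < size))) (fun x => x) true)
      ((pvGroup placements slot_index).map (fun e => (e.1, pvRuns (PySem.List.sorted e.2 (fun x => x) false))))

-- ===== PRECONDITION & SPEC =====
-- Pre_ excludes exactly the inputs where Python A raises KeyError: a placement whose slot is not a
-- key of slot_index (Python B raises there too).
def Pre_is_split_pattern_satisfied_py (placements : List (String × String)) (pattern : List Int) (slot_index : List (String × Int)) : Prop :=
  ∀ p ∈ placements, (PySem.Dict.mk slot_index).contains p.2 = true
instance (placements : List (String × String)) (pattern : List Int) (slot_index : List (String × Int)) : Decidable (Pre_is_split_pattern_satisfied_py placements pattern slot_index) := by unfold Pre_is_split_pattern_satisfied_py; infer_instance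

def pvWitness_is_split_pattern_satisfied_py : (List (String × String)) × List Int × (List (String × Int)) :=
  ([("Mon", "a"), ("Mon", "b")], [2], [("a", 0), ("b", 1)])

def Spec_is_split_pattern_satisfied_py (placements : List (String × String)) (pattern : List Int) (slot_index : List (String × Int)) (out : Bool) : Prop := out = is_split_pattern_satisfied_py_alt placements pattern slot_index
instance (placements : List (String × String)) (pattern : List Int) (slot_index : List (String × Int)) (out : Bool) : Decidable (Spec_is_split_pattern_satisfied_py placements pattern slot_index out) := by unfold Spec_is_split_pattern_satisfied_py; infer_instance

-- ===== CLAIM (what is proved, stated in full; the proofs are below) =====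
def Claim_equal_is_split_pattern_satisfied_py : Prop := ∀ (placements : List (String × String)) (pattern : List Int) (slot_index : List (String × Int)), Dom_is_split_pattern_satisfied_py placements pattern slot_index → Pre_is_split_pattern_satisfied_py placements pattern slot_index → Spec_is_split_pattern_satisfied_py placements pattern slot_index (is_split_pattern_satisfied_py placements pattern slot_index)

-- ===== LEMMAS AND PROOFS =====

-- a maximal consecutive run as a value block: [v, v+1, …, v+m-1]
def blockOf (v : Int) : Nat → List Int
  | 0 => []
  | m + 1 => v :: blockOf (v + 1) m

-- what prepending a full run in front of a list does to its run decomposition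
def fixHead (v mi : Int) : List (Int × Int) → List (Int × Int)
  | (q, ql) :: t => if q = v + mi then (v, mi + ql) :: t else (v, mi) :: (q, ql) :: t
  | [] => [(v, mi)]

lemma blockOf_zero (v : Int) : blockOf v 0 = [] := rfl

lemma blockOf_succ (v : Int) (m : Nat) : blockOf v (m + 1) = v :: blockOf (v + 1) m := rfl

lemma blockOf_length (v : Int) (m : Nat) : (blockOf v m).length = m := by
  induction m generalizing v with
  | zero => rfl
  | succ m ih => simp [blockOf, ih]

lemma blockOf_drop (v : Int) (m k : Nat) : (blockOf v m).drop k = blockOf (v + k) (m - k) := by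
  induction k generalizing v m with
  | zero => simp
  | succ k ih =>
    cases m with
    | zero => simp [blockOf]
    | succ m =>
      rw [blockOf_succ, List.drop_succ_cons, ih]
      congr 1
      · push_cast; ring
      · omega

lemma blockOf_getElem (v : Int) (m k : Nat) (h : k < m) : (blockOf v m)[k]'(by simp [blockOf_length, h]) = v + k := by
  induction k generalizing v m with
  | zero =>
    cases m with
    | zero => omega
    | succ m => simp [blockOf_succ]
  | succ k ih =>
    cases m with
    | zero => omega
    | succ m =>
      have e : (blockOf v (m + 1))[k + 1]'(by simp [blockOf_length]; omega) =
          (blockOf (v + 1) m)[k]'(by simp [blockOf_length]; omega) := rfl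
      rw [e, ih (v + 1) m (by omega)]
      push_cast; ring

-- decomposition of a list into its first maximal run and the remainder
lemma run_decomp (v : Int) (rest : List Int) :
    v :: rest = blockOf v (pvRunLen v rest + 1) ++ rest.drop (pvRunLen v rest) := by
  induction rest generalizing v with
  | nil => simp [pvRunLen, blockOf]
  | cons x xs ih =>
    by_cases hx : x = v + 1
    · subst hx
      have h1 : pvRunLen v ((v + 1) :: xs) = 1 + pvRunLen (v + 1) xs := by simp [pvRunLen]
      rw [h1, show 1 + pvRunLen (v + 1) xs + 1 = (pvRunLen (v + 1) xs + 1) + 1 from by omega,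
        blockOf_succ, show 1 + pvRunLen (v + 1) xs = pvRunLen (v + 1) xs + 1 from by omega,
        List.drop_succ_cons]
      simp only [List.cons_append]
      exact congrArg (v :: ·) (ih (v + 1))
    · have h0 : pvRunLen v (x :: xs) = 0 := by simp [pvRunLen, hx]
      simp [h0, blockOf_succ, blockOf_zero]

lemma run_boundary (v : Int) (rest : List Int) :
    ∀ w, (rest.drop (pvRunLen v rest)).head? = some w → w ≠ v + (pvRunLen v rest : Int) + 1 := by
  induction rest generalizing v with
  | nil => intro w hw; simp [pvRunLen] at hw
  | cons x xs ih =>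
    intro w hw
    by_cases hx : x = v + 1
    · subst hx
      have h1 : pvRunLen v ((v + 1) :: xs) = 1 + pvRunLen (v + 1) xs := by simp [pvRunLen]
      rw [h1, show 1 + pvRunLen (v + 1) xs = pvRunLen (v + 1) xs + 1 from by omega,
        List.drop_succ_cons] at hw
      have := ih (v + 1) w hw
      rw [h1]
      intro hc; apply this; rw [hc]; push_cast; ring
    · have h0 : pvRunLen v (x :: xs) = 0 := by simp [pvRunLen, hx]
      rw [h0, List.drop_zero, List.head?_cons] at hw
      cases hw
      rw [h0]
      simpa using hx

lemma runLen_block (v : Int) (m : Nat) (u : List Int) :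
    pvRunLen v (blockOf (v + 1) m ++ u) = m + pvRunLen (v + m) u := by
  induction m generalizing v with
  | zero => simp [blockOf_zero]
  | succ m ih =>
    rw [blockOf_succ]
    simp only [List.cons_append]
    have step : pvRunLen v ((v + 1) :: (blockOf (v + 1 + 1) m ++ u)) =
        1 + pvRunLen (v + 1) (blockOf (v + 1 + 1) m ++ u) := by simp [pvRunLen]
    rw [step, ih (v + 1)]
    have harg : v + 1 + (m : Int) = v + ((m + 1 : Nat) : Int) := by push_cast; ring
    rw [harg]
    omega

lemma runs_cons (v : Int) (rest : List Int) :
    pvRuns (v :: rest) = (v, (pvRunLen v rest : Int) + 1) :: pvRuns (rest.drop (pvRunLen v rest)) := by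
  simp only [pvRuns]

lemma runs_block_append (v : Int) (m : Nat) (u : List Int) (hm : 1 ≤ m) :
    pvRuns (blockOf v m ++ u) = fixHead v (m : Int) (pvRuns u) := by
  obtain ⟨m', rfl⟩ : ∃ m', m = m' + 1 := ⟨m - 1, by omega⟩
  rw [blockOf_succ, List.cons_append, runs_cons, runLen_block]
  have hdrop : (blockOf (v + 1) m' ++ u).drop (m' + pvRunLen (v + m') u) =
      u.drop (pvRunLen (v + m') u) := by
    rw [List.drop_append, List.drop_eq_nil_of_le (by rw [blockOf_length]; omega),
      blockOf_length]
    simp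
  rw [hdrop]
  cases u with
  | nil => simp [pvRunLen, pvRuns, fixHead]
  | cons x xs =>
    by_cases hx : x = (v + m') + 1
    · have hrl : pvRunLen (v + m') (x :: xs) = 1 + pvRunLen x xs := by
        simp [pvRunLen, hx]
      rw [hrl, runs_cons, fixHead]
      rw [if_pos (by rw [hx]; push_cast; ring)]
      have : (x :: xs).drop (1 + pvRunLen x xs) = xs.drop (pvRunLen x xs) := by
        rw [Nat.add_comm, List.drop_succ_cons]
      rw [this]
      congr 2
      push_cast; ring
    · have hrl : pvRunLen (v + m') (x :: xs) = 0 := by simp [pvRunLen, hx]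
      rw [hrl, runs_cons, fixHead]
      rw [if_neg (by intro hc; apply hx; rw [hc]; push_cast; ring)]
      rw [← runs_cons]
      simp only [List.drop_zero]
      congr 2

-- the window test: true iff each adjacent pair increases by exactly 1 (nonempty window)
lemma consec_iff (w : List Int) (hw : w ≠ []) :
    pvConsecA w = true ↔ ∀ j (h : j + 1 < w.length), w[j + 1] = w[j]'(by omega) + 1 := by
  unfold pvConsecA
  rw [if_neg (by simpa using hw)]
  rw [List.all_eq_true]
  constructor
  · intro hall j hj
    have hmem : (j : Int) ∈ PySem.List.pyRange 0 (PySem.List.len w - 1) 1 := by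
      rw [PySem.List.mem_pyRange_one, PySem.List.len_eq]
      constructor
      · exact Int.natCast_nonneg j
      · omega
    have := hall _ hmem
    rw [PySem.List.pyGetD_eq_getElem w 0 (by omega) (by omega),
      PySem.List.pyGetD_eq_getElem w 0 (by omega) (by omega)] at this
    have heq : ((j : Int) + 1).toNat = j + 1 := by omega
    have heq2 : ((j : Int)).toNat = j := by omega
    simp only [heq, heq2] at this
    have := Int.sub_eq_iff_eq_add.mp (by exact_mod_cast (beq_iff_eq.mp this))
    omega
  · intro hpt idx hidx
    rw [PySem.List.mem_pyRange_one, PySem.List.len_eq] at hidx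
    obtain ⟨h0, h1⟩ := hidx
    rw [PySem.List.pyGetD_eq_getElem w 0 (by omega) (by omega),
      PySem.List.pyGetD_eq_getElem w 0 (by omega) (by omega)]
    have hj : (idx + 1).toNat = idx.toNat + 1 := by omega
    simp only [hj]
    have := hpt idx.toNat (by omega)
    rw [this]
    simp

lemma tryA_bounds (l : List Int) (s : Int) (pos : Int) (h : pvTryDayA l s = some pos) :
    0 ≤ pos ∧ pos + s ≤ (l.length : Int) := by
  unfold pvTryDayA at h
  have hmem := List.mem_of_find?_eq_some h
  rw [PySem.List.mem_pyRange_one, PySem.List.len_eq] at hmem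
  omega

lemma windowP (l : List Int) (s pos : Int) (h0 : 0 ≤ pos) (hs : 2 ≤ s)
    (hle : pos + s ≤ (l.length : Int)) :
    pvConsecA (PySem.List.slice l (some pos) (some (pos + s))) = true ↔
      ∀ i : Nat, i + 1 < s.toNat → ∀ (h : pos.toNat + i + 1 < l.length),
        l[pos.toNat + i + 1] = l[pos.toNat + i]'(by omega) + 1 := by
  rw [PySem.List.slice_toNat l (by omega) (by omega)]
  rw [show (pos + s).toNat - pos.toNat = s.toNat from by omega]
  have hwlen : ((l.drop pos.toNat).take s.toNat).length = s.toNat := by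
    simp only [List.length_take, List.length_drop]; omega
  rw [consec_iff _ (by intro hnil; rw [hnil] at hwlen; simp at hwlen; omega)]
  constructor
  · intro hc i hi h
    have := hc i (by rw [hwlen]; omega)
    simp only [List.getElem_take, List.getElem_drop] at this
    have e1 : pos.toNat + (i + 1) = pos.toNat + i + 1 := by omega
    simp only [e1] at this
    exact this
  · intro hp j hj
    have hj' : j + 1 < s.toNat := by rw [hwlen] at hj; exact hj
    have := hp j hj' (by omega)
    simp only [List.getElem_take, List.getElem_drop]
    have e1 : pos.toNat + (j + 1) = pos.toNat + j + 1 := by omega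
    simp only [e1]
    exact this

-- A's window scan on a run-decomposed list: a long-enough head run is found at pos 0,
-- otherwise no window starting inside the head run is consecutive and the scan shifts to the tail
lemma tryA_block (v : Int) (m : Nat) (t : List Int) (s : Int) (hm : 1 ≤ m) (hs : 2 ≤ s)
    (hb : ∀ w, t.head? = some w → w ≠ v + (m : Int)) :
    pvTryDayA (blockOf v m ++ t) s =
      if s ≤ (m : Int) then some 0 else (pvTryDayA t s).map (fun pos => (m : Int) + pos) := by
  have hlen : ((blockOf v m ++ t).length : Int) = (m : Int) + t.length := by
    simp [blockOf_length]
  -- values inside the block, and the first value after it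
  have hblk : ∀ j : Nat, j < m → ∀ (h : j < (blockOf v m ++ t).length),
      (blockOf v m ++ t)[j] = v + j := by
    intro j hj h
    rw [List.getElem_append_left (by rw [blockOf_length]; omega)]
    exact blockOf_getElem v m j hj
  have hbound : ∀ (h : m < (blockOf v m ++ t).length),
      (blockOf v m ++ t)[m] ≠ v + m := by
    intro h
    have ht : 0 < t.length := by rw [List.length_append, blockOf_length] at h; omega
    have e : (blockOf v m ++ t)[m]'h = t[0]'ht := by
      rw [List.getElem_append_right (by rw [blockOf_length])]
      simp [blockOf_length]
    rw [e]
    refine hb (t[0]'ht) ?_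
    rw [List.head?_eq_getElem?, List.getElem?_eq_getElem ht]
  -- windows that start inside the block but do not fit in it are not consecutive
  have hfail : ∀ pos : Int, 0 ≤ pos → pos < m → (m : Int) < s →
      pos + s ≤ ((blockOf v m ++ t).length : Int) →
      pvConsecA (PySem.List.slice (blockOf v m ++ t) (some pos) (some (pos + s))) = false := by
    intro pos hp0 hpm hms hple
    rw [← Bool.not_eq_true]
    intro hcons
    rw [windowP _ s pos hp0 hs hple] at hcons
    have hmlt : m < (blockOf v m ++ t).length := by omega
    have hkey := hcons (m - 1 - pos.toNat) (by omega) (by omega)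
    have e2 : pos.toNat + (m - 1 - pos.toNat) = m - 1 := by omega
    simp only [e2] at hkey
    have e1 : m - 1 + 1 = m := by omega
    simp only [e1] at hkey
    apply hbound hmlt
    rw [hkey, hblk (m - 1) (by omega) (by omega)]
    omega
  unfold pvTryDayA
  simp only [PySem.List.len_eq]
  by_cases hsm : s ≤ (m : Int)
  · rw [if_pos hsm]
    rw [PySem.List.pyRange_one_cons (by omega)]
    apply List.find?_cons_of_pos
    rw [windowP _ s 0 le_rfl hs (by omega)]
    intro i hi h
    simp only [show (0 : Int).toNat = 0 from rfl, Nat.zero_add] at h ⊢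
    rw [hblk (i + 1) (by omega) h, hblk i (by omega) (by omega)]
    push_cast
    ring
  · rw [if_neg hsm]
    replace hsm : (m : Int) < s := by omega
    by_cases hK : 0 < ((blockOf v m ++ t).length : Int) - s + 1
    · by_cases hK' : 0 < (t.length : Int) - s + 1
      · rw [PySem.List.pyRange_one_append 0 (m : Int) _ (by omega) (by omega)]
        rw [List.find?_append]
        have h1 : List.find? (fun pos => pvConsecA (PySem.List.slice (blockOf v m ++ t)
            (some pos) (some (pos + s)))) (PySem.List.pyRange 0 (m : Int) 1) = none := by
          rw [List.find?_eq_none]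
          intro x hx
          rw [PySem.List.mem_pyRange_one] at hx
          rw [hfail x hx.1 hx.2 (by omega) (by omega)]
          simp
        rw [h1, Option.none_or]
        rw [PySem.List.pyRange_one (m : Int) _, PySem.List.pyRange_one 0 _]
        rw [List.find?_map, List.find?_map]
        have hsz : (((blockOf v m ++ t).length : Int) - s + 1 - m).toNat =
            ((t.length : Int) - s + 1 - 0).toNat := by omega
        rw [hsz]
        have hdrop : ∀ k : Nat, (blockOf v m ++ t).drop (m + k) = t.drop k := by
          intro k
          rw [List.drop_append, List.drop_eq_nil_of_le (by rw [blockOf_length]; omega),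
            blockOf_length]
          simp
        have hpred : ∀ k : Nat,
            pvConsecA (PySem.List.slice (blockOf v m ++ t)
              (some ((m : Int) + k)) (some ((m : Int) + k + s))) =
            pvConsecA (PySem.List.slice t (some ((0 : Int) + k)) (some ((0 : Int) + k + s))) := by
          intro k
          rw [PySem.List.slice_toNat _ (by omega) (by omega),
            PySem.List.slice_toNat _ (by omega) (by omega)]
          rw [show ((m : Int) + k + s).toNat - ((m : Int) + k).toNat = s.toNat from by omega,
            show ((0 : Int) + k + s).toNat - ((0 : Int) + k).toNat = s.toNat from by omega,
            show ((m : Int) + k).toNat = m + k from by omega,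
            show ((0 : Int) + k).toNat = k from by omega,
            hdrop k]
        have hfun : ((fun pos => (m : Int) + pos) ∘ fun k : Nat => (0 : Int) + (k : Int)) =
            (fun k : Nat => (m : Int) + (k : Int)) := by
          funext k; simp
        have hpe : ((fun pos => pvConsecA (PySem.List.slice (blockOf v m ++ t)
              (some pos) (some (pos + s)))) ∘ fun k : Nat => (m : Int) + (k : Int)) =
            ((fun pos => pvConsecA (PySem.List.slice t (some pos) (some (pos + s)))) ∘
              fun k : Nat => (0 : Int) + (k : Int)) := by
          funext k
          simp only [Function.comp_apply]
          exact hpred k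
        rw [Option.map_map, hfun, hpe]
      · have ht : List.find? (fun pos => pvConsecA (PySem.List.slice t (some pos) (some (pos + s))))
            (PySem.List.pyRange 0 ((t.length : Int) - s + 1) 1) = none := by
          rw [PySem.List.pyRange_one_eq_nil (by omega)]
          rfl
        rw [ht, Option.map_none]
        rw [List.find?_eq_none]
        intro x hx
        rw [PySem.List.mem_pyRange_one] at hx
        rw [hfail x hx.1 (by omega) (by omega) (by omega)]
        simp
    · rw [PySem.List.pyRange_one_eq_nil (by omega)]
      rw [PySem.List.pyRange_one_eq_nil (by omega)]
      rfl

lemma fixHead_ne (v mi : Int) (xs : List (Int × Int))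
    (h : ∀ q ql t', xs = (q, ql) :: t' → q ≠ v + mi) :
    fixHead v mi xs = (v, mi) :: xs := by
  cases xs with
  | nil => rfl
  | cons a t' =>
    obtain ⟨q, ql⟩ := a
    simp only [fixHead]
    rw [if_neg (h q ql t' rfl)]

lemma go_shift (v mi s : Int) (hs : 2 ≤ s) :
    ∀ (rs acc : List (Int × Int)),
      (∀ q ql rest', acc.reverse ++ rs = (q, ql) :: rest' → q ≠ v + mi ∧ v + mi - 1 ≤ q) →
      pvPlaceGo s (acc ++ [(v, mi)]) rs = Option.map (fixHead v mi) (pvPlaceGo s acc rs) := by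
  intro rs
  induction rs with
  | nil => intro acc hinv; simp [pvPlaceGo]
  | cons hd rest ih =>
    intro acc hinv
    obtain ⟨st, ln⟩ := hd
    by_cases hln : s ≤ ln
    · by_cases hlt : s < ln
      · -- partial shrink of the found run
        simp only [pvPlaceGo, if_pos hln, if_pos hlt, Option.map_some]
        rw [fixHead_ne v mi _ ?hne]
        · simp [List.reverse_append]
        case hne =>
          intro q ql t' heq
          cases hacc : acc.reverse with
          | nil =>
            rw [hacc, List.nil_append] at heq
            cases heq
            have hst := hinv st ln rest (by rw [hacc, List.nil_append])
            omega
          | cons a0 ar =>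
            obtain ⟨a1, a2⟩ := a0
            rw [hacc, List.cons_append] at heq
            cases heq
            exact (hinv q ql (ar ++ (st, ln) :: rest) (by rw [hacc, List.cons_append])).1
      · -- the found run is removed whole
        simp only [pvPlaceGo, if_pos hln, if_neg hlt]
        cases acc with
        | nil =>
          cases rest with
          | nil => simp [fixHead]
          | cons b t =>
            obtain ⟨q, ql⟩ := b
            by_cases hq : q = v + mi
            · simp [fixHead, hq]
            · simp [fixHead, hq]
        | cons a acc'' =>
          obtain ⟨p, pl⟩ := a
          have hpfact : ∀ (X : Int) (w : List (Int × Int)) (q ql : Int) (t' : List (Int × Int)),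
              acc''.reverse ++ (p, X) :: w = (q, ql) :: t' → q ≠ v + mi := by
            intro X w q ql t' heq
            cases hacc : acc''.reverse with
            | nil =>
              rw [hacc, List.nil_append] at heq
              cases heq
              refine (hinv p pl ((st, ln) :: rest) ?_).1
              rw [List.reverse_cons, hacc]
              simp
            | cons a0 ar =>
              obtain ⟨a1, a2⟩ := a0
              rw [hacc, List.cons_append] at heq
              cases heq
              refine (hinv q ql (ar ++ [(p, pl)] ++ (st, ln) :: rest) ?_).1
              rw [List.reverse_cons, hacc]
              simp
          cases rest with
          | nil =>
            simp only [Option.map_some]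
            rw [fixHead_ne v mi _ (by
              intro q ql t' heq
              exact hpfact pl [] q ql t' (by simpa using heq))]
            simp [List.reverse_append]
          | cons b t =>
            obtain ⟨q0, ql0⟩ := b
            change (if q0 = p + pl then some ((acc'' ++ [(v, mi)]).reverse ++ (p, pl + ql0) :: t)
                else some (((p, pl) :: (acc'' ++ [(v, mi)])).reverse ++ (q0, ql0) :: t)) =
              Option.map (fixHead v mi) (if q0 = p + pl then some (acc''.reverse ++ (p, pl + ql0) :: t)
                else some (((p, pl) :: acc'').reverse ++ (q0, ql0) :: t))
            by_cases hq : q0 = p + pl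
            · rw [if_pos hq, if_pos hq, Option.map_some]
              rw [fixHead_ne v mi _ (fun q ql t' heq => hpfact (pl + ql0) t q ql t' heq)]
              simp [List.reverse_append]
            · rw [if_neg hq, if_neg hq, Option.map_some]
              rw [show ((p, pl) :: acc'').reverse ++ (q0, ql0) :: t =
                  acc''.reverse ++ (p, pl) :: (q0, ql0) :: t from by simp]
              rw [fixHead_ne v mi _ (fun q ql t' heq => hpfact pl ((q0, ql0) :: t) q ql t' heq)]
              simp [List.reverse_append]
    · -- run too short: step on
      simp only [pvPlaceGo, if_neg hln]
      rw [show (st, ln) :: (acc ++ [(v, mi)]) = ((st, ln) :: acc) ++ [(v, mi)] from rfl]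
      apply ih ((st, ln) :: acc)
      intro q ql rest' heq
      apply hinv q ql rest'
      rw [List.reverse_cons, List.append_assoc] at heq
      exact heq

-- the per-day core: B's run placement computes exactly A's first-window removal
lemma day_main (l : List Int) (s : Int) (hs : 2 ≤ s) (hsort : l.Pairwise (· ≤ ·)) :
    pvPlaceB (pvRuns l) s = (pvTryDayA l s).map (fun pos => pvRuns (pvRemoveAt l pos s)) := by
  suffices H : ∀ (n : Nat) (l' : List Int), l'.length = n → l'.Pairwise (· ≤ ·) →
      pvPlaceB (pvRuns l') s = (pvTryDayA l' s).map (fun pos => pvRuns (pvRemoveAt l' pos s)) by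
    exact H l.length l rfl hsort
  intro n
  induction n using Nat.strong_induction_on with
  | _ n ih =>
  intro l hlen hsort
  cases l with
  | nil =>
    have htry : pvTryDayA [] s = none := by
      unfold pvTryDayA
      rw [PySem.List.pyRange_one_eq_nil (by simp [PySem.List.len_eq]; omega)]
      rfl
    rw [htry]
    simp [pvRuns, pvPlaceB, pvPlaceGo]
  | cons v rest =>
    -- the first maximal run of l has length m; t is the remainder
    set m : Nat := pvRunLen v rest + 1 with hm
    set t : List Int := rest.drop (pvRunLen v rest) with htdef
    have hdecomp : v :: rest = blockOf v m ++ t := run_decomp v rest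
    have hbound : ∀ w, t.head? = some w → w ≠ v + (m : Int) := by
      intro w hw hc
      apply run_boundary v rest w hw
      rw [hc, hm]
      push_cast
      ring
    have hruns : pvRuns (v :: rest) = (v, (m : Int)) :: pvRuns t := by
      rw [runs_cons, hm]
      push_cast
      rfl
    have htsort : t.Pairwise (· ≤ ·) :=
      List.Pairwise.sublist (List.drop_sublist _ _) (List.Pairwise.of_cons hsort)
    have hheadge : ∀ q ql t', pvRuns t = (q, ql) :: t' →
        q ≠ v + (m : Int) ∧ v + (m : Int) - 1 ≤ q := by
      intro q ql t' hq
      cases hteq : t with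
      | nil => rw [hteq] at hq; simp [pvRuns] at hq
      | cons x xs =>
        rw [hteq, runs_cons] at hq
        cases hq
        refine ⟨hbound q (by rw [hteq]; rfl), ?_⟩
        have hps : (blockOf v m ++ (q :: xs)).Pairwise (· ≤ ·) := by
          rw [← hteq, ← hdecomp]
          exact hsort
        have hmem1 : v + ((m - 1 : Nat) : Int) ∈ blockOf v m := by
          have hg : (blockOf v m)[m - 1]'(by rw [blockOf_length]; omega) =
              v + ((m - 1 : Nat) : Int) := blockOf_getElem v m (m - 1) (by omega)
          rw [← hg]
          exact List.getElem_mem _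
        have hle := (List.pairwise_append.mp hps).2.2 _ hmem1 q (by simp)
        have hcast : ((m - 1 : Nat) : Int) = (m : Int) - 1 := by omega
        rw [hcast] at hle
        omega
    have htry := tryA_block v m t s (by omega) hs hbound
    rw [← hdecomp] at htry
    rw [htry, hruns]
    unfold pvPlaceB
    by_cases hsm : s ≤ (m : Int)
    · rw [if_pos hsm]
      simp only [Option.map_some]
      have hrem : pvRemoveAt (v :: rest) 0 s = blockOf (v + s) (m - s.toNat) ++ t := by
        unfold pvRemoveAt
        rw [PySem.List.slice_to _ (by omega), PySem.List.slice_from _ (by omega)]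
        rw [show ((0 : Int)).toNat = 0 from rfl, show ((0 : Int) + s).toNat = s.toNat from by omega]
        rw [List.take_zero, List.nil_append]
        rw [hdecomp, List.drop_append, blockOf_drop,
          show s.toNat - (blockOf v m).length = 0 from by rw [blockOf_length]; omega,
          List.drop_zero,
          show v + (s.toNat : Int) = v + s from by omega]
      by_cases hlt : s < (m : Int)
      · rw [show pvPlaceGo s [] ((v, (m : Int)) :: pvRuns t) =
            some ((v + s, (m : Int) - s) :: pvRuns t) from by
          simp only [pvPlaceGo, if_pos hsm, if_pos hlt]
          simp]
        rw [hrem, runs_block_append (v + s) (m - s.toNat) t (by omega)]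
        rw [fixHead_ne _ _ _ ?hc]
        · congr 3
          omega
        case hc =>
          intro q ql t' hq
          have hne := (hheadge q ql t' hq).1
          intro hcontra
          apply hne
          rw [hcontra]
          have : ((m - s.toNat : Nat) : Int) = (m : Int) - s := by omega
          rw [this]
          ring
      · rw [show pvPlaceGo s [] ((v, (m : Int)) :: pvRuns t) = some (pvRuns t) from by
          simp only [pvPlaceGo, if_pos hsm, if_neg hlt]
          cases hpt : pvRuns t with
          | nil => simp
          | cons b t' => cases b; simp]
        rw [hrem, show m - s.toNat = 0 from by omega, blockOf_zero, List.nil_append]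
    · rw [if_neg hsm]
      rw [show pvPlaceGo s [] ((v, (m : Int)) :: pvRuns t) =
          pvPlaceGo s ([] ++ [(v, (m : Int))]) (pvRuns t) from by
        simp only [pvPlaceGo, if_neg hsm]
        rfl]
      rw [go_shift v (m : Int) s hs (pvRuns t) []
        (by intro q ql rest' hq; exact hheadge q ql rest' (by simpa using hq))]
      rw [show pvPlaceGo s [] (pvRuns t) = pvPlaceB (pvRuns t) s from rfl]
      rw [ih t.length (by
        rw [htdef, List.length_drop]
        simp only [List.length_cons] at hlen
        omega) t rfl htsort]
      cases htr : pvTryDayA t s with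
      | none => simp
      | some pos =>
        simp only [Option.map_some]
        congr 1
        obtain ⟨hp0, hple⟩ := tryA_bounds t s pos htr
        have hremshift : pvRemoveAt (v :: rest) ((m : Int) + pos) s =
            blockOf v m ++ pvRemoveAt t pos s := by
          unfold pvRemoveAt
          rw [PySem.List.slice_to _ (by omega), PySem.List.slice_from _ (by omega),
            PySem.List.slice_to _ (by omega), PySem.List.slice_from _ (by omega)]
          rw [hdecomp, List.take_append, List.drop_append]
          rw [List.take_of_length_le (by rw [blockOf_length]; omega),
            List.drop_eq_nil_of_le (by rw [blockOf_length]; omega)]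
          rw [blockOf_length]
          rw [show ((m : Int) + pos).toNat - m = pos.toNat from by omega,
            show ((m : Int) + pos + s).toNat - m = (pos + s).toNat from by omega]
          simp [List.append_assoc]
        rw [hremshift, runs_block_append v m _ (by omega)]

lemma removeAt_sublist (l : List Int) (pos s : Int) (h0 : 0 ≤ pos) (hs : 0 ≤ s) :
    (pvRemoveAt l pos s).Sublist l := by
  unfold pvRemoveAt
  rw [PySem.List.slice_to l h0, PySem.List.slice_from l (by omega)]
  conv_rhs => rw [← List.take_append_drop pos.toNat l]
  refine List.Sublist.append (List.Sublist.refl _) ?_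
  have : l.drop ((pos + s).toNat) = (l.drop pos.toNat).drop ((pos + s).toNat - pos.toNat) := by
    rw [List.drop_drop]; congr 1; omega
  rw [this]
  exact List.drop_sublist _ _

lemma searchA_preserves (bd bd' : List (String × List Int)) (s : Int) (hs : 2 ≤ s)
    (h : pvSearchA bd s = some bd') (hsort : ∀ e ∈ bd, e.2.Pairwise (· ≤ ·)) :
    ∀ e ∈ bd', e.2.Pairwise (· ≤ ·) := by
  induction bd generalizing bd' with
  | nil => simp [pvSearchA] at h
  | cons hd rest ih =>
    obtain ⟨d, idxs⟩ := hd
    simp only [pvSearchA] at h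
    cases htry : pvTryDayA idxs s with
    | some pos =>
      rw [htry] at h
      cases h
      intro e he
      rcases List.mem_cons.mp he with rfl | hmem
      · obtain ⟨h0, _⟩ := tryA_bounds idxs s pos htry
        exact List.Pairwise.sublist (removeAt_sublist idxs pos s h0 (by omega))
          (hsort (d, idxs) (List.mem_cons_self))
      · exact hsort _ (List.mem_cons_of_mem _ hmem)
    | none =>
      rw [htry] at h
      cases hrec : pvSearchA rest s with
      | none => rw [hrec] at h; cases h
      | some rest' =>
        rw [hrec] at h
        cases h
        intro e he
        rcases List.mem_cons.mp he with rfl | hmem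
        · exact hsort _ (List.mem_cons_self)
        · exact ih rest' hrec (fun e' he' => hsort _ (List.mem_cons_of_mem _ he')) e hmem

lemma search_eq (bd : List (String × List Int)) (s : Int) (hs : 2 ≤ s)
    (hsort : ∀ e ∈ bd, e.2.Pairwise (· ≤ ·)) :
    pvSearchB (bd.map (fun e => (e.1, pvRuns e.2))) s =
      (pvSearchA bd s).map (List.map (fun e => (e.1, pvRuns e.2))) := by
  induction bd with
  | nil => simp [pvSearchA, pvSearchB]
  | cons hd rest ih =>
    obtain ⟨d, idxs⟩ := hd
    simp only [List.map_cons, pvSearchA, pvSearchB, pvPlaceB]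
    have hday := day_main idxs s hs (hsort (d, idxs) (List.mem_cons_self))
    rw [pvPlaceB] at hday
    rw [hday]
    cases htry : pvTryDayA idxs s with
    | some pos => simp
    | none =>
      simp only [Option.map_none]
      rw [ih (fun e he => hsort _ (List.mem_cons_of_mem _ he))]
      cases pvSearchA rest s <;> simp

lemma loop_eq (sizes : List Int) (bd : List (String × List Int))
    (hsz : ∀ s ∈ sizes, 2 ≤ s) (hsort : ∀ e ∈ bd, e.2.Pairwise (· ≤ ·)) :
    pvLoopB sizes (bd.map (fun e => (e.1, pvRuns e.2))) = pvLoopA sizes bd := by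
  induction sizes generalizing bd with
  | nil => rfl
  | cons sz sizes ih =>
    simp only [pvLoopA, pvLoopB]
    rw [search_eq bd sz (hsz sz (List.mem_cons_self)) hsort]
    cases h : pvSearchA bd sz with
    | none => simp
    | some bd' =>
      simp only [Option.map_some]
      exact ih bd' (fun t ht => hsz t (List.mem_cons_of_mem _ ht))
        (searchA_preserves bd bd' sz (hsz sz (List.mem_cons_self)) h hsort)

-- ===== VERDICT (by name: the statement is the Claim_ definition above) =====
theorem is_split_pattern_satisfied_py_spec : Claim_equal_is_split_pattern_satisfied_py := by
  intro placements pattern slot_index _ _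
  unfold Spec_is_split_pattern_satisfied_py
  unfold is_split_pattern_satisfied_py is_split_pattern_satisfied_py_alt
  by_cases hemp : placements.isEmpty
  · simp [hemp]
  · simp only [hemp, Bool.false_eq_true]
    have hmaps : (pvGroup placements slot_index).map
        (fun e => (e.1, pvRuns (PySem.List.sorted e.2 (fun x => x) false))) =
        ((pvGroup placements slot_index).map
          (fun e => (e.1, PySem.List.sorted e.2 (fun x => x) false))).map
          (fun e => (e.1, pvRuns e.2)) := by
      rw [List.map_map]
      rfl
    rw [hmaps]
    rw [loop_eq]
    · intro t ht
      rw [PySem.List.mem_sorted] at ht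
      have := (List.mem_filter.mp ht).2
      simp at this
      omega
    · intro e he
      obtain ⟨a, _, rfl⟩ := List.mem_map.mp he
      simpa using PySem.List.sorted_pairwise a.2 (fun x => x)
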